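-- pv_equiv track=rewrite | github.com/nkoranda97/Rosalind-problems | problems/motzkin_nums/main.py | count_non_crossing_matches
-- ===== SOURCE A (Python) =====
-- def count_non_crossing_matches(seq: str) -> int:
--
--     memo = {}
--
--     valid_pairs = {'A': 'U', 'U': 'A', 'C': 'G', 'G': 'C'}
--
--     def recurse(start: int, end: int) -> int:
--         if (start, end) in memo:
--             return memo[(start, end)]
--
--         if start >= end:
--             return 1
--
--         count = recurse(start + 1, end)
--         for i in range(start + 1, end + 1):
--             if seq[start] == valid_pairs.get(seq[i], ''):
--                 count += recurse(start + 1, i - 1) * recurse(i + 1, end)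
--                 count %= 1000000
--
--         memo[(start, end)] = count
--         return count
--
--     return recurse(0, len(seq) - 1)
-- ===== SOURCE B (Python) =====
-- def count_non_crossing_matches(seq: str) -> int:
--     n = len(seq)
--     if n == 0:
--         return 1
--     pair = {'A': 'U', 'U': 'A', 'C': 'G', 'G': 'C'}
--     # dp[s][e] = number of non-crossing matchings of seq[s..e] mod 1e6; 1 when s >= e
--     dp = [[1] * (n + 1) for _ in range(n + 1)]
--     for length in range(2, n + 1):
--         for s in range(0, n - length + 1):
--             e = s + length - 1
--             total = dp[s + 1][e]
--             ps = pair.get(seq[s])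
--             for j in range(s + 1, e + 1):
--                 if seq[j] == ps:
--                     total = (total + dp[s + 1][j - 1] * dp[j + 1][e]) % 1000000
--             dp[s][e] = total
--     return dp[0][n - 1]
-- ===== Notes on version B (the rewrite author's own statement) =====
-- stated objective: alternative
-- what changed: Replaced A's top-down memoized recursion over intervals by a bottom-up dynamic-programming table dp[s][e] filled in order of increasing interval length, with the same pairing rule applied through the symmetric A-U/C-G map.
import Mathlib
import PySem

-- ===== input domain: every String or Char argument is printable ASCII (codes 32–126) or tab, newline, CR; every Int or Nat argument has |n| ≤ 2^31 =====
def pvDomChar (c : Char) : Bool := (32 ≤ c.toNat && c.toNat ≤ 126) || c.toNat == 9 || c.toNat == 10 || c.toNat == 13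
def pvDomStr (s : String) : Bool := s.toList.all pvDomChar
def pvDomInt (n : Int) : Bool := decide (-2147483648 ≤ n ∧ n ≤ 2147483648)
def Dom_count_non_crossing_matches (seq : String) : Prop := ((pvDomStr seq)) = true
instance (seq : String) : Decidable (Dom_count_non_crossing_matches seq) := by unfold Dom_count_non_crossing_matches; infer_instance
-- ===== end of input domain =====

-- B replaces A's top-down memoized recursion by a bottom-up interval DP table filled by
-- increasing interval length (objective: alternative decomposition, same O(n^3) cost).

-- ===== PORT A =====
-- valid_pairs.get(c, '') encoded as Option Char: seq[start] is a one-character string,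
-- so comparing it with the default '' is always False, exactly `none ≠ some _`.
def pairsA (c : Char) : Option Char :=
  if c = 'A' then some 'U' else if c = 'U' then some 'A'
  else if c = 'C' then some 'G' else if c = 'G' then some 'C' else none

-- seq[i]; every access made by `recurseA` is in range, the default is never returned
def chrA (chars : List Char) (i : Int) : Char := PySem.List.pyGetD chars i ' '

-- A's `recurse`, without the memo dictionary (a pure cache: the values returned are
-- identical).  The extra fuel argument only makes the recursion structural; the depth
-- of A's recursion is bounded by the interval length, so fuel = len(seq) never runs out
-- (recurseA_fuel below proves fuel-irrelevance above that bound).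
def recurseA (chars : List Char) : Nat → Int → Int → Int
  | 0, _, _ => 1
  | fuel + 1, start, e =>
    if start ≥ e then 1
    else
      (PySem.List.pyRange (start + 1) (e + 1) 1).foldl
        (fun count i =>
          if pairsA (chrA chars i) == some (chrA chars start) then
            (count + recurseA chars fuel (start + 1) (i - 1) *
              recurseA chars fuel (i + 1) e) % 1000000
          else count)
        (recurseA chars fuel (start + 1) e)

def count_non_crossing_matches (seq : String) : Int :=
  recurseA seq.toList seq.toList.length 0 (PySem.Str.len seq - 1)

-- ===== PORT B =====
def pairsB (c : Char) : Option Char :=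
  if c = 'A' then some 'U' else if c = 'U' then some 'A'
  else if c = 'C' then some 'G' else if c = 'G' then some 'C' else none

-- seq[j]; every access made by B is in range, the default is never returned
def chrB (chars : List Char) (j : Nat) : Char := chars.getD j ' '

-- dp[s][e] read / write; all accesses B makes are in range
def get2 (dp : List (List Int)) (s e : Nat) : Int := (dp.getD s []).getD e 0
def set2 (dp : List (List Int)) (s e : Nat) (v : Int) : List (List Int) :=
  dp.set s ((dp.getD s []).set e v)

-- the inner `for j in range(s+1, e+1)` loop computing the new dp[s][e]
def bInterval (chars : List Char) (dp : List (List Int)) (s e : Nat) : Int :=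
  (List.range' (s + 1) (e - s)).foldl
    (fun total j =>
      if some (chrB chars j) == pairsB (chrB chars s) then
        (total + get2 dp (s + 1) (j - 1) * get2 dp (j + 1) e) % 1000000
      else total)
    (get2 dp (s + 1) e)

-- the `for s in range(0, n - length + 1)` loop for one interval length
def bFill (chars : List Char) (n : Nat) (dp : List (List Int)) (len : Nat) : List (List Int) :=
  (List.range (n - len + 1)).foldl
    (fun dp s => set2 dp s (s + len - 1) (bInterval chars dp s (s + len - 1))) dp

def count_non_crossing_matches_alt (seq : String) : Int :=
  let chars := seq.toList
  let n := chars.length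
  if n = 0 then 1
  else
    let dp := (List.range' 2 (n - 1)).foldl (bFill chars n)
      (List.replicate (n + 1) (List.replicate (n + 1) (1 : Int)))
    get2 dp 0 (n - 1)

-- ===== PRECONDITION & SPEC =====
def Spec_count_non_crossing_matches (seq : String) (out : Int) : Prop := out = count_non_crossing_matches_alt seq
instance (seq : String) (out : Int) : Decidable (Spec_count_non_crossing_matches seq out) := by unfold Spec_count_non_crossing_matches; infer_instance

-- ===== CLAIM (what is proved, stated in full; the proofs are below) =====
def Claim_equal_count_non_crossing_matches : Prop := ∀ (seq : String), Dom_count_non_crossing_matches seq → Spec_count_non_crossing_matches seq (count_non_crossing_matches seq)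

-- ===== LEMMAS AND PROOFS =====

-- dp is an (n+1) × (n+1) table
def Shape (n : Nat) (dp : List (List Int)) : Prop :=
  dp.length = n + 1 ∧ ∀ r ∈ dp, r.length = n + 1

-- table state after lengths 2..L are done and, within length L+1, starts < s₀ are done
def DpInv (chars : List Char) (n L s₀ : Nat) (dp : List (List Int)) : Prop :=
  Shape n dp ∧ ∀ x y : Nat, x ≤ n → y ≤ n →
    get2 dp x y =
      if x < y ∧ y < n ∧ (y + 1 ≤ x + L ∨ (y + 1 = x + L + 1 ∧ x < s₀)) then
        recurseA chars n x y
      else 1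

-- table state after all interval lengths 2..L are done
def Filled (chars : List Char) (n L : Nat) (dp : List (List Int)) : Prop :=
  Shape n dp ∧ ∀ x y : Nat, x ≤ n → y ≤ n →
    get2 dp x y =
      if x < y ∧ y < n ∧ y + 1 ≤ x + L then recurseA chars n x y else 1

theorem pairs_swap (a b : Char) : (pairsA a == some b) = (some a == pairsB b) := by
  simp only [pairsA, pairsB]
  split_ifs <;> simp_all <;> exact fun h => by simp_all [h.symm]

theorem chr_cast (chars : List Char) (k : Nat) : chrA chars (k : Int) = chrB chars k := by
  simp [chrA, chrB, PySem.List.pyGetD_natCast]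

theorem recurseA_base (chars : List Char) (f : Nat) (x y : Int) (h : x ≥ y) :
    recurseA chars f x y = 1 := by
  cases f with
  | zero => rfl
  | succ f => simp only [recurseA]; rw [if_pos h]

-- any fuel at least the interval length gives the same value
theorem recurseA_fuel (chars : List Char) :
    ∀ f g : Nat, ∀ start e : Int, (e - start).toNat ≤ f → (e - start).toNat ≤ g →
      recurseA chars f start e = recurseA chars g start e := by
  intro f
  induction f with
  | zero =>
    intro g start e hf _
    rw [recurseA_base chars 0 start e (by omega), recurseA_base chars g start e (by omega)]
  | succ f ih =>
    intro g start e hf hg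
    by_cases hse : start ≥ e
    · rw [recurseA_base _ _ _ _ hse, recurseA_base _ _ _ _ hse]
    · obtain ⟨g', rfl⟩ : ∃ g', g = g' + 1 := ⟨g - 1, by omega⟩
      simp only [recurseA]
      rw [if_neg hse, if_neg hse, ih g' (start + 1) e (by omega) (by omega)]
      refine PySem.List.foldl_congr_mem _ _ _ _ ?_
      intro acc i hi
      rw [PySem.List.mem_pyRange_one] at hi
      rw [ih g' (start + 1) (i - 1) (by omega) (by omega),
        ih g' (i + 1) e (by omega) (by omega)]

theorem shape_set2 {n : Nat} {dp : List (List Int)} (h : Shape n dp) {s : Nat}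
    (hs : s ≤ n) (e : Nat) (v : Int) : Shape n (set2 dp s e v) := by
  obtain ⟨h1, h2⟩ := h
  have hsl : s < dp.length := by omega
  refine ⟨by simp [set2, h1], fun r hr => ?_⟩
  rcases List.mem_or_eq_of_mem_set hr with hmem | heq
  · exact h2 r hmem
  · subst heq
    rw [List.length_set, List.getD_eq_getElem _ _ hsl]
    exact h2 _ (List.getElem_mem hsl)

theorem get2_set2_same {n : Nat} {dp : List (List Int)} (h : Shape n dp)
    {s e : Nat} (hs : s ≤ n) (he : e ≤ n) (v : Int) :
    get2 (set2 dp s e v) s e = v := by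
  obtain ⟨h1, h2⟩ := h
  have hsl : s < dp.length := by omega
  have hrow : (dp.getD s []).length = n + 1 := by
    rw [List.getD_eq_getElem _ _ hsl]; exact h2 _ (List.getElem_mem hsl)
  unfold get2 set2
  have hrowget : (dp.set s ((dp.getD s []).set e v)).getD s [] = (dp.getD s []).set e v := by
    rw [List.getD_eq_getElem?_getD, List.getElem?_set_self hsl, Option.getD_some]
  rw [hrowget, List.getD_eq_getElem?_getD, List.getElem?_set_self (by omega), Option.getD_some]

theorem get2_set2_ne {dp : List (List Int)} {s e x y : Nat}
    (h : x ≠ s ∨ y ≠ e) (v : Int) :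
    get2 (set2 dp s e v) x y = get2 dp x y := by
  unfold get2 set2
  by_cases hx : x = s
  · subst hx
    have hy : y ≠ e := h.resolve_left (by simp)
    by_cases hl : x < dp.length
    · have h1 : (dp.set x ((dp.getD x []).set e v)).getD x [] = (dp.getD x []).set e v := by
        rw [List.getD_eq_getElem?_getD, List.getElem?_set_self hl, Option.getD_some]
      rw [h1, List.getD_eq_getElem?_getD, List.getElem?_set_ne (Ne.symm hy),
        ← List.getD_eq_getElem?_getD]
    · rw [List.set_eq_of_length_le (by omega)]
  · have h1 : (dp.set s ((dp.getD s []).set e v)).getD x [] = dp.getD x [] := by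
      rw [List.getD_eq_getElem?_getD, List.getElem?_set_ne (Ne.symm hx),
        ← List.getD_eq_getElem?_getD]
    rw [h1]

theorem bInterval_eq (chars : List Char) {n : Nat} (hn : n = chars.length)
    (dp : List (List Int)) {s e : Nat} (hse : s < e) (hen : e < n)
    (H : ∀ x y : Nat, x ≤ n → y < n → (y : Int) - x < (e : Int) - s →
      get2 dp x y = recurseA chars n x y) :
    bInterval chars dp s e = recurseA chars n (s : Int) (e : Int) := by
  rw [bInterval, List.range'_eq_map_range, List.foldl_map]
  rw [recurseA_fuel chars n ((e - s - 1) + 1) (s : Int) (e : Int) (by omega) (by omega)]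
  simp only [recurseA]
  rw [if_neg (by omega : ¬((s : Int) ≥ (e : Int)))]
  rw [PySem.List.pyRange_one]
  have hcount : (((e : Int) + 1) - ((s : Int) + 1)).toNat = e - s := by omega
  rw [hcount, List.foldl_map]
  have hinit : get2 dp (s + 1) e = recurseA chars (e - s - 1) ((s : Int) + 1) (e : Int) := by
    rw [H (s + 1) e (by omega) hen (by push_cast; omega)]
    push_cast
    exact recurseA_fuel chars n (e - s - 1) _ _ (by omega) (by omega)
  rw [hinit]
  refine PySem.List.foldl_congr_mem _ _ _ _ ?_
  intro acc k hk
  rw [List.mem_range] at hk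
  have hcast1 : ((s : Int) + 1 + (k : Int)) = ((s + 1 + k : Nat) : Int) := by push_cast; ring
  rw [hcast1, chr_cast, chr_cast, pairs_swap]
  congr 1
  have v1 : get2 dp (s + 1) (s + 1 + k - 1) =
      recurseA chars (e - s - 1) ((s : Int) + 1) (((s + 1 + k : Nat) : Int) - 1) := by
    have n1 : s + 1 + k - 1 = s + k := by omega
    have b1 : ((s + 1 + k : Nat) : Int) - 1 = ((s + k : Nat) : Int) := by push_cast; ring
    rw [n1, b1, H (s + 1) (s + k) (by omega) (by omega) (by push_cast; omega)]
    push_cast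
    exact recurseA_fuel chars n (e - s - 1) _ _ (by omega) (by omega)
  have v2 : get2 dp (s + 1 + k + 1) e =
      recurseA chars (e - s - 1) (((s + 1 + k : Nat) : Int) + 1) ((e : Nat) : Int) := by
    have n2 : s + 1 + k + 1 = s + 2 + k := by omega
    have b2 : ((s + 1 + k : Nat) : Int) + 1 = ((s + 2 + k : Nat) : Int) := by push_cast; ring
    rw [n2, b2, H (s + 2 + k) e (by omega) hen (by push_cast; omega)]
    push_cast
    exact recurseA_fuel chars n (e - s - 1) _ _ (by omega) (by omega)
  rw [v1, v2]

theorem inner_step {chars : List Char} {n : Nat} (hn : n = chars.length)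
    {L s₀ : Nat} {dp : List (List Int)} (hL : 1 ≤ L) (hs : s₀ + L < n)
    (h : DpInv chars n L s₀ dp) :
    DpInv chars n L (s₀ + 1) (set2 dp s₀ (s₀ + L) (bInterval chars dp s₀ (s₀ + L))) := by
  obtain ⟨hsh, hval⟩ := h
  have hbi : bInterval chars dp s₀ (s₀ + L) = recurseA chars n (s₀ : Int) ((s₀ + L : Nat) : Int) := by
    apply bInterval_eq chars hn dp (by omega) (by omega)
    intro x y hx hy hlt
    rw [hval x y hx (by omega)]
    by_cases hxy : x < y
    · rw [if_pos ⟨hxy, hy, Or.inl (by omega)⟩]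
    · rw [if_neg (fun hcon => hxy hcon.1), recurseA_base chars n _ _ (by omega)]
  refine ⟨shape_set2 hsh (by omega) _ _, fun x y hx hy => ?_⟩
  by_cases hxy : x = s₀ ∧ y = s₀ + L
  · obtain ⟨hx', hy'⟩ := hxy; subst hx'; subst hy'
    rw [get2_set2_same hsh hx hy, hbi,
      if_pos ⟨by omega, by omega, Or.inr ⟨by omega, by omega⟩⟩]
  · have hne : x ≠ s₀ ∨ y ≠ s₀ + L := by tauto
    rw [get2_set2_ne hne, hval x y hx hy]
    by_cases hc : x < y ∧ y < n ∧ (y + 1 ≤ x + L ∨ (y + 1 = x + L + 1 ∧ x < s₀))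
    · refine (if_pos hc).trans (if_pos ?_).symm
      rcases hc.2.2 with h3 | h3
      · exact ⟨hc.1, hc.2.1, Or.inl h3⟩
      · exact ⟨hc.1, hc.2.1, Or.inr ⟨h3.1, by omega⟩⟩
    · refine (if_neg hc).trans (if_neg fun hcon => ?_).symm
      rcases hcon with ⟨h1, h2, h3 | h3⟩
      · exact hc ⟨h1, h2, Or.inl h3⟩
      · rcases Nat.lt_or_ge x s₀ with hxs | hxs
        · exact hc ⟨h1, h2, Or.inr ⟨h3.1, hxs⟩⟩
        · have hx0 : x = s₀ := by omega
          have hy0 : y = s₀ + L := by omega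
          exact hxy ⟨hx0, hy0⟩

theorem inner_fold {chars : List Char} {n : Nat} (hn : n = chars.length)
    {L : Nat} (hL : 1 ≤ L) {dp : List (List Int)} (h : DpInv chars n L 0 dp) :
    ∀ k, k ≤ n - L →
      DpInv chars n L k ((List.range k).foldl
        (fun dp s => set2 dp s (s + (L + 1) - 1) (bInterval chars dp s (s + (L + 1) - 1))) dp) := by
  intro k
  induction k with
  | zero => intro _; simpa using h
  | succ k ih =>
    intro hk
    rw [List.range_succ, List.foldl_append, List.foldl_cons, List.foldl_nil]
    have hkl : k + (L + 1) - 1 = k + L := by omega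
    rw [hkl]
    exact inner_step hn hL (by omega) (ih (by omega))

theorem fill_step {chars : List Char} {n : Nat} (hn : n = chars.length)
    {L : Nat} (hL : 1 ≤ L) (hLn : L + 1 ≤ n) {dp : List (List Int)}
    (h : Filled chars n L dp) :
    Filled chars n (L + 1) (bFill chars n dp (L + 1)) := by
  unfold bFill
  have hr : n - (L + 1) + 1 = n - L := by omega
  rw [hr]
  have h0 : DpInv chars n L 0 dp := by
    obtain ⟨hsh, hv⟩ := h
    refine ⟨hsh, fun x y hx hy => ?_⟩
    rw [hv x y hx hy]
    by_cases hc : x < y ∧ y < n ∧ y + 1 ≤ x + L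
    · exact (if_pos hc).trans (if_pos ⟨hc.1, hc.2.1, Or.inl hc.2.2⟩).symm
    · refine (if_neg hc).trans (if_neg fun hcon => ?_).symm
      rcases hcon with ⟨h1, h2, h3 | h3⟩
      · exact hc ⟨h1, h2, h3⟩
      · omega
  obtain ⟨hsh, hv⟩ := inner_fold hn hL h0 (n - L) (le_refl _)
  refine ⟨hsh, fun x y hx hy => ?_⟩
  rw [hv x y hx hy]
  by_cases hc : x < y ∧ y < n ∧ (y + 1 ≤ x + L ∨ (y + 1 = x + L + 1 ∧ x < n - L))
  · refine (if_pos hc).trans (if_pos ?_).symm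
    rcases hc.2.2 with h3 | h3
    · exact ⟨hc.1, hc.2.1, by omega⟩
    · exact ⟨hc.1, hc.2.1, by omega⟩
  · refine (if_neg hc).trans (if_neg fun hcon => ?_).symm
    obtain ⟨h1, h2, h3⟩ := hcon
    by_cases h4 : y + 1 ≤ x + L
    · exact hc ⟨h1, h2, Or.inl h4⟩
    · exact hc ⟨h1, h2, Or.inr ⟨by omega, by omega⟩⟩

theorem dp0_filled (chars : List Char) (n : Nat) :
    Filled chars n 1 (List.replicate (n + 1) (List.replicate (n + 1) (1 : Int))) := by
  refine ⟨⟨by simp, fun r hr => by rw [List.eq_of_mem_replicate hr]; simp⟩,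
    fun x y hx hy => ?_⟩
  unfold get2
  rw [List.getD_replicate _ (by omega), List.getD_replicate _ (by omega),
    if_neg (fun hcon => by omega)]

theorem outer_fold {chars : List Char} {n : Nat} (hn : n = chars.length)
    {dp0 : List (List Int)} (h : Filled chars n 1 dp0) :
    ∀ m, m + 1 ≤ n →
      Filled chars n (m + 1) ((List.range' 2 m).foldl (bFill chars n) dp0) := by
  intro m
  induction m with
  | zero => intro _; simpa using h
  | succ m ih =>
    intro hm
    rw [List.range'_concat, List.foldl_append, List.foldl_cons, List.foldl_nil]
    have hL : 2 + 1 * m = (m + 1) + 1 := by omega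
    rw [hL]
    exact fill_step hn (by omega) (by omega) (ih (by omega))

-- ===== VERDICT (by name: the statement is the Claim_ definition above) =====
theorem count_non_crossing_matches_spec : Claim_equal_count_non_crossing_matches := by
  intro seq _
  show recurseA seq.toList seq.toList.length 0 (PySem.Str.len seq - 1) =
    if seq.toList.length = 0 then 1
    else get2 ((List.range' 2 (seq.toList.length - 1)).foldl (bFill seq.toList seq.toList.length)
      (List.replicate (seq.toList.length + 1) (List.replicate (seq.toList.length + 1) (1 : Int))))
      0 (seq.toList.length - 1)
  rw [PySem.Str.len_eq]
  set n := seq.toList.length with hn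
  by_cases h0 : n = 0
  · rw [if_pos h0, recurseA_base _ _ _ _ (by omega)]
  · rw [if_neg h0]
    obtain ⟨_, hv⟩ := outer_fold hn (dp0_filled seq.toList n) (n - 1) (by omega)
    rw [hv 0 (n - 1) (by omega) (by omega)]
    by_cases h1 : 0 < n - 1
    · rw [if_pos ⟨h1, by omega, by omega⟩]
      have hc : ((n - 1 : Nat) : Int) = (n : Int) - 1 := by omega
      rw [hc]; norm_cast
    · rw [if_neg (fun hcon => h1 hcon.1), recurseA_base _ _ _ _ (by omega)]
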